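-- pv_equiv track=rewrite | github.com/dbortolotti/palate | palate/server.py | suggest_entity_id
-- ===== SOURCE A (Python) =====
-- def suggest_entity_id(entity_type: str, canonical_name: str) -> str:
--     base = "_".join(
--         part
--         for part in "".join(
--             char.lower() if char.isalnum() else " "
--             for char in canonical_name
--         ).split()
--     )
--     if not base:
--         base = "item"
--     return f"{entity_type}_{base}"
-- ===== SOURCE B (Python) =====
-- def suggest_entity_id(entity_type: str, canonical_name: str) -> str:
--     words = []
--     buf = []
--     for char in canonical_name:
--         if char.isalnum():
--             buf.append(char.lower())
--         elif buf:
--             words.append(''.join(buf))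
--             buf = []
--     if buf:
--         words.append(''.join(buf))
--     base = '_'.join(words)
--     if not base:
--         base = 'item'
--     return f'{entity_type}_{base}'
-- ===== Notes on version B (the rewrite author's own statement) =====
-- stated objective: alternative
-- what changed: Replaced A's map-every-char-to-space, build intermediate string, str.split(), join pipeline by a single accumulator pass that groups alphanumeric runs (words list + current-word buffer) directly, with no intermediate mapped string.
import Mathlib
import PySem

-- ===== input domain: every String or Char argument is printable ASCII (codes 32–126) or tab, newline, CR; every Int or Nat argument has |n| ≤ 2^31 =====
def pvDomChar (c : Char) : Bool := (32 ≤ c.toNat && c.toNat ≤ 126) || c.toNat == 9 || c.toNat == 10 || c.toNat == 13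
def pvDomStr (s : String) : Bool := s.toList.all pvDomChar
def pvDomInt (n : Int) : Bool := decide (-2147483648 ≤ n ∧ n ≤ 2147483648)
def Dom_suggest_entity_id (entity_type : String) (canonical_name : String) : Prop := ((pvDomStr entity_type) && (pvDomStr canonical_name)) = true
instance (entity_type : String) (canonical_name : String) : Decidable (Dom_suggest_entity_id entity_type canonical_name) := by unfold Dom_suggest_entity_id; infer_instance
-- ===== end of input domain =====

-- B replaces A's map-to-spaces / split / join pipeline by a single accumulator pass that
-- groups alphanumeric runs directly (objective: alternative decomposition, same cost).

-- ===== PORT A =====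
-- A: build the space-mapped string, split on whitespace, join the parts with '_'.
def suggest_entity_id (entity_type : String) (canonical_name : String) : String :=
  let mapped := canonical_name.toList.map
    (fun c => if PySem.Chars.isalnum c then PySem.Chars.lowerChar c else ' ')
  let base := PySem.Chars.join ['_'] (PySem.Chars.split₀ mapped)
  let base := if base.isEmpty then "item".toList else base
  String.mk (entity_type.toList ++ '_' :: base)

-- ===== PORT B =====
-- one step of B's loop: state = (finished words, current-word buffer)
def sidStep (st : List (List Char) × List Char) (c : Char) : List (List Char) × List Char :=
  if PySem.Chars.isalnum c then (st.1, st.2 ++ [PySem.Chars.lowerChar c])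
  else if st.2.isEmpty then st
  else (st.1 ++ [st.2], [])

def suggest_entity_id_alt (entity_type : String) (canonical_name : String) : String :=
  let st := canonical_name.toList.foldl sidStep ([], [])
  let words := if st.2.isEmpty then st.1 else st.1 ++ [st.2]
  let base := PySem.Chars.join ['_'] words
  let base := if base.isEmpty then "item".toList else base
  String.mk (entity_type.toList ++ '_' :: base)

-- ===== PRECONDITION & SPEC =====
def Spec_suggest_entity_id (entity_type : String) (canonical_name : String) (out : String) : Prop := out = suggest_entity_id_alt entity_type canonical_name
instance (entity_type : String) (canonical_name : String) (out : String) : Decidable (Spec_suggest_entity_id entity_type canonical_name out) := by unfold Spec_suggest_entity_id; infer_instance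

-- ===== CLAIM (what is proved, stated in full; the proofs are below) =====
def Claim_equal_suggest_entity_id : Prop := ∀ (entity_type : String) (canonical_name : String), Dom_suggest_entity_id entity_type canonical_name → Spec_suggest_entity_id entity_type canonical_name (suggest_entity_id entity_type canonical_name)

-- ===== LEMMAS AND PROOFS =====

-- on ASCII, the space-mapped char is whitespace exactly when the original is not alphanumeric
theorem sid_mapped_space_fin : ∀ n : Fin 128,
    PySem.Chars.isspace (if PySem.Chars.isalnum (Char.ofNat n.val) then
        PySem.Chars.lowerChar (Char.ofNat n.val) else ' ')
      = !PySem.Chars.isalnum (Char.ofNat n.val) := by decide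

theorem sid_mapped_space (c : Char) (h : pvDomChar c = true) :
    PySem.Chars.isspace (if PySem.Chars.isalnum c then PySem.Chars.lowerChar c else ' ')
      = !PySem.Chars.isalnum c := by
  have hlt : c.toNat < 128 := by
    simp [pvDomChar] at h
    omega
  have hc : Char.ofNat c.toNat = c := Char.ofNat_toNat c
  have := sid_mapped_space_fin ⟨c.toNat, hlt⟩
  simpa [hc] using this

-- split₀.go over the mapped list is B's accumulator loop
theorem sid_go_eq (cs : List Char) : ∀ (cur : List Char) (acc : List (List Char)),
    (∀ c ∈ cs, pvDomChar c = true) →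
    PySem.Chars.split₀.go
        (cs.map (fun c => if PySem.Chars.isalnum c then PySem.Chars.lowerChar c else ' '))
        cur acc =
      (let st := cs.foldl sidStep (acc.reverse, cur.reverse)
       if st.2.isEmpty then st.1 else st.1 ++ [st.2]) := by
  induction cs with
  | nil =>
      intro cur acc _
      by_cases hcur : cur.isEmpty
      · simp [PySem.Chars.split₀.go, List.isEmpty_iff.mp hcur]
      · have hcn : cur ≠ [] := by simpa [List.isEmpty_iff] using hcur
        simp [PySem.Chars.split₀.go, hcur]
  | cons c cs ih =>
      intro cur acc hdom
      have hc : pvDomChar c = true := hdom c (by simp)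
      have hsp := sid_mapped_space c hc
      have hdom' : ∀ x ∈ cs, pvDomChar x = true := fun x hx => hdom x (by simp [hx])
      by_cases ha : PySem.Chars.isalnum c
      · have hns : PySem.Chars.isspace (PySem.Chars.lowerChar c) = false := by
          simpa [ha] using hsp
        simp only [List.map_cons, ha, if_true, List.foldl_cons]
        rw [show PySem.Chars.split₀.go
              (PySem.Chars.lowerChar c ::
                cs.map (fun c => if PySem.Chars.isalnum c then PySem.Chars.lowerChar c else ' '))
              cur acc =
            PySem.Chars.split₀.go
              (cs.map (fun c => if PySem.Chars.isalnum c then PySem.Chars.lowerChar c else ' '))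
              (PySem.Chars.lowerChar c :: cur) acc from by
          simp [PySem.Chars.split₀.go, hns]]
        rw [ih (PySem.Chars.lowerChar c :: cur) acc hdom']
        simp [sidStep, ha]
      · have hs : PySem.Chars.isspace ' ' = true := by
          simpa [ha] using hsp
        by_cases hcur : cur.isEmpty
        · have hcn : cur = [] := List.isEmpty_iff.mp hcur
          simp only [List.map_cons, List.foldl_cons]
          rw [if_neg ha]
          rw [show PySem.Chars.split₀.go
              (' ' :: cs.map (fun c => if PySem.Chars.isalnum c then PySem.Chars.lowerChar c else ' '))
              cur acc =
            PySem.Chars.split₀.go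
              (cs.map (fun c => if PySem.Chars.isalnum c then PySem.Chars.lowerChar c else ' '))
              [] acc from by
            simp [PySem.Chars.split₀.go, hs, hcur]]
          rw [ih [] acc hdom']
          simp [sidStep, ha, hcn]
        · have hcn : cur ≠ [] := by simpa [List.isEmpty_iff] using hcur
          simp only [List.map_cons, List.foldl_cons]
          rw [if_neg ha]
          rw [show PySem.Chars.split₀.go
              (' ' :: cs.map (fun c => if PySem.Chars.isalnum c then PySem.Chars.lowerChar c else ' '))
              cur acc =
            PySem.Chars.split₀.go
              (cs.map (fun c => if PySem.Chars.isalnum c then PySem.Chars.lowerChar c else ' '))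
              [] (cur.reverse :: acc) from by
            simp [PySem.Chars.split₀.go, hs, hcur]]
          rw [ih [] (cur.reverse :: acc) hdom']
          simp [sidStep, ha, hcur]

theorem sid_split_eq (cs : List Char) (h : ∀ c ∈ cs, pvDomChar c = true) :
    PySem.Chars.split₀
        (cs.map (fun c => if PySem.Chars.isalnum c then PySem.Chars.lowerChar c else ' ')) =
      (let st := cs.foldl sidStep ([], [])
       if st.2.isEmpty then st.1 else st.1 ++ [st.2]) := by
  have := sid_go_eq cs [] [] h
  simpa [PySem.Chars.split₀] using this

-- ===== VERDICT (by name: the statement is the Claim_ definition above) =====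
theorem suggest_entity_id_spec : Claim_equal_suggest_entity_id := by
  intro et cn hdom
  unfold Spec_suggest_entity_id suggest_entity_id suggest_entity_id_alt
  have hdomcn : ∀ c ∈ cn.toList, pvDomChar c = true := by
    have : pvDomStr cn = true := by
      unfold Dom_suggest_entity_id at hdom
      simp at hdom
      exact hdom.2
    simpa [pvDomStr, List.all_eq_true] using this
  simp only [sid_split_eq cn.toList hdomcn]
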